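-- pv_equiv track=rewrite | github.com/diiaz2910/test | Parte_1/letra_e.py | letra_e
-- ===== SOURCE A (Python) =====
-- def letra_e(arreglo, indice=0):
--     if indice >= len (arreglo):
--         #se devuelve una lista vacia si no existen coincidencias
--         return []
--     palabra_actual = arreglo[indice]
--     longitud = len (palabra_actual)
--     # se revisa que el resto de la cadena sea impar pues no existe el centro en una cadena par
--     if longitud % 2 == 1:
--         letra_central = palabra_actual[longitud // 2]
--         if letra_central == "e":
--             return [palabra_actual] + letra_e(arreglo, indice + 1)
--     return letra_e(arreglo, indice + 1)
-- ===== SOURCE B (Python) =====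
-- def letra_e(arreglo, indice=0):
--     result = []
--     for i in range(indice, len(arreglo)):
--         w = arreglo[i]
--         if len(w) % 2 == 1 and w[len(w) // 2] == "e":
--             result.append(w)
--     return result
-- ===== Notes on version B (the rewrite author's own statement) =====
-- stated objective: idiomatic
-- what changed: Replaced the tail recursion with a cursor argument by a single iterative loop over range(indice, len(arreglo)) with an accumulator list.
import Mathlib
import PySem

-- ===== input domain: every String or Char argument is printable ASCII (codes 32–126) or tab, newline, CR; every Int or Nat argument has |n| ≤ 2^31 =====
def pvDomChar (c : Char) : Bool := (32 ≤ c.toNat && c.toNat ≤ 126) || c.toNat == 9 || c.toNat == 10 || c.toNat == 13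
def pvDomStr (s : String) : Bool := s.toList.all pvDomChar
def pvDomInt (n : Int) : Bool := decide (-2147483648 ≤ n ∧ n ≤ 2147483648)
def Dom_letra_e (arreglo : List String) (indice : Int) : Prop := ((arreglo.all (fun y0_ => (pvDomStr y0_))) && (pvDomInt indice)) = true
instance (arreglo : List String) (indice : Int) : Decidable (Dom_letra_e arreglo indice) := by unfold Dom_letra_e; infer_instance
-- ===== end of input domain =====

-- B replaces A's cursor tail recursion by one iterative loop with an accumulator (idiomatic).

-- ===== PORT A =====
-- literal transliteration of A's recursion on the cursor `indice`
def letra_e (arreglo : List String) (indice : Int) : List String :=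
  if _h : indice ≥ (arreglo.length : Int) then []
  else
    match PySem.List.pyGet? arreglo indice with
    | none => []   -- Python raises IndexError here (indice < -len); excluded by Pre_
    | some palabra_actual =>
      let longitud : Int := PySem.Str.len palabra_actual
      if PySem.Int.mod longitud 2 = 1 then
        match PySem.Str.pyGet? palabra_actual (PySem.Int.floordiv longitud 2) with
        | some letra_central =>
          if letra_central = 'e' then
            palabra_actual :: letra_e arreglo (indice + 1)
          else letra_e arreglo (indice + 1)
        | none => letra_e arreglo (indice + 1)   -- unreachable: odd length ⇒ mid in range
      else letra_e arreglo (indice + 1)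
termination_by ((arreglo.length : Int) - indice).toNat
decreasing_by all_goals omega

-- ===== PORT B =====
-- one loop step of Source B's for-loop body
def letraeStep (arreglo : List String) (result : List String) (i : Int) : List String :=
  match PySem.List.pyGet? arreglo i with
  | none => result   -- Python raises IndexError here; excluded by Pre_
  | some w =>
    if PySem.Int.mod (PySem.Str.len w) 2 = 1 ∧
       PySem.Str.pyGet? w (PySem.Int.floordiv (PySem.Str.len w) 2) = some 'e'
    then result ++ [w] else result

def letra_e_alt (arreglo : List String) (indice : Int) : List String :=
  (PySem.List.pyRange indice (arreglo.length : Int) 1).foldl (letraeStep arreglo) []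

-- ===== PRECONDITION & SPEC =====
-- Pre_ excludes exactly the inputs (indice < -len(arreglo)) on which the Python A raises IndexError.
def Pre_letra_e (arreglo : List String) (indice : Int) : Prop :=
  -(arreglo.length : Int) ≤ indice
instance (arreglo : List String) (indice : Int) : Decidable (Pre_letra_e arreglo indice) := by
  unfold Pre_letra_e; infer_instance

def pvWitness_letra_e : List String × Int := (["abe", "xex", "be", "e"], 0)

def Spec_letra_e (arreglo : List String) (indice : Int) (out : List String) : Prop := out = letra_e_alt arreglo indice
instance (arreglo : List String) (indice : Int) (out : List String) : Decidable (Spec_letra_e arreglo indice out) := by unfold Spec_letra_e; infer_instance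

-- ===== CLAIM (what is proved, stated in full; the proofs are below) =====
def Claim_equal_letra_e : Prop := ∀ (arreglo : List String) (indice : Int), Dom_letra_e arreglo indice → Pre_letra_e arreglo indice → Spec_letra_e arreglo indice (letra_e arreglo indice)

-- ===== LEMMAS AND PROOFS =====

-- the loop step only appends: the accumulator factors out
theorem letraeStep_acc (arreglo : List String) (acc : List String) (i : Int) :
    letraeStep arreglo acc i = acc ++ letraeStep arreglo [] i := by
  unfold letraeStep
  cases PySem.List.pyGet? arreglo i with
  | none => simp
  | some w => dsimp only; split_ifs <;> simp

theorem foldl_letraeStep_acc (arreglo : List String) (l : List Int) (acc : List String) :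
    l.foldl (letraeStep arreglo) acc = acc ++ l.foldl (letraeStep arreglo) [] := by
  induction l generalizing acc with
  | nil => simp
  | cons i l ih =>
    simp only [List.foldl_cons]
    rw [ih, letraeStep_acc, ih (letraeStep arreglo [] i), List.append_assoc]

theorem letra_e_eq_alt (arreglo : List String) :
    ∀ (k : Nat) (indice : Int), ((arreglo.length : Int) - indice).toNat = k →
      -(arreglo.length : Int) ≤ indice →
      letra_e arreglo indice = letra_e_alt arreglo indice := by
  intro k
  induction k with
  | zero =>
    intro indice hk hlo
    have h : indice ≥ (arreglo.length : Int) := by omega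
    rw [letra_e, letra_e_alt, dif_pos h,
      PySem.List.pyRange_one_eq_nil (a := indice) (b := (arreglo.length : Int)) (by omega)]
    rfl
  | succ k ih =>
    intro indice hk hlo
    have h : ¬ indice ≥ (arreglo.length : Int) := by omega
    have hget : PySem.List.pyGet? arreglo indice ≠ none := by
      rw [Ne, PySem.List.pyGet?_eq_none_iff]
      simp only [PySem.Raise.InRange]; omega
    rcases Option.ne_none_iff_exists'.1 hget with ⟨w, hw⟩
    have hrec : letra_e arreglo (indice + 1) = letra_e_alt arreglo (indice + 1) :=
      ih (indice + 1) (by omega) (by omega)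
    have hrange : PySem.List.pyRange indice (arreglo.length : Int) 1
        = indice :: PySem.List.pyRange (indice + 1) (arreglo.length : Int) 1 :=
      PySem.List.pyRange_one_cons (by omega)
    rw [letra_e, dif_neg h, hw, letra_e_alt, hrange]
    simp only [List.foldl_cons]
    rw [foldl_letraeStep_acc, ← letra_e_alt, hrec]
    simp only [letraeStep, hw]
    by_cases hodd : ((w.length : Int) % 2 = 1)
    · cases hmid : PySem.List.pyGet? w.toList ((w.length : Int) / 2) with
      | none => simp [hodd, hmid]
      | some c => by_cases hc : c = 'e' <;> simp [hodd, hmid, hc]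
    · simp [hodd]

-- ===== VERDICT (by name: the statement is the Claim_ definition above) =====
theorem letra_e_spec : Claim_equal_letra_e := by
  intro arreglo indice _hdom hpre
  exact letra_e_eq_alt arreglo ((arreglo.length : Int) - indice).toNat indice rfl hpre
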